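-- pv_equiv track=rewrite | github.com/kakirastern/pySSN | pyssn/phyat_lists/manage_phyat_list.py | remove_iso
-- ===== SOURCE A (Python) =====
-- def remove_iso(atom):
--     res = ''
--     elem_done = False
--     for char in atom:
--         if not elem_done:
--             if char not in '1234567890':
--                 res += char
--                 elem_done = True
--         else:
--             res += char
--     return res
-- ===== SOURCE B (Python) =====
-- def remove_iso(atom):
--     i = 0
--     while i < len(atom) and atom[i] in '1234567890':
--         i += 1
--     return atom[i:]
-- ===== Notes on version B (the rewrite author's own statement) =====
-- stated objective: simpler
-- what changed: B locates the index of the first non-digit character with a while loop and returns the suffix slice, instead of rebuilding the string character-by-character with an elem_done flag.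
import Mathlib
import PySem

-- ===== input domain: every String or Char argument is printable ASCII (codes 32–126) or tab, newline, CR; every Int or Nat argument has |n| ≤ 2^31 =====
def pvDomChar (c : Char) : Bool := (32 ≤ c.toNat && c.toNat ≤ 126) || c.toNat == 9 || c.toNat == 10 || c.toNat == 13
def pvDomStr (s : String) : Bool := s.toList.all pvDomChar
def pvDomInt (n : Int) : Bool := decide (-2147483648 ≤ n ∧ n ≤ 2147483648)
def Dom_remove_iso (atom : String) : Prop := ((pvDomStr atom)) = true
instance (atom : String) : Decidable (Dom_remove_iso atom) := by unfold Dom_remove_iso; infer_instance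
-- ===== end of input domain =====

-- B finds the first non-digit index and returns the suffix slice instead of rebuilding the string with a flag (objective: simpler).

-- shared transliteration of the Python membership test  char in '1234567890'
def remove_iso_isDig (c : Char) : Bool := ("1234567890".toList).contains c

-- ===== PORT A =====
-- step: one iteration of A's for-loop over state (res, elem_done)
def remove_iso_step (st : List Char × Bool) (c : Char) : List Char × Bool :=
  if !st.2 then
    if !(remove_iso_isDig c) then (st.1 ++ [c], true) else st
  else (st.1 ++ [c], st.2)

def remove_iso (atom : String) : String :=
  String.mk (atom.toList.foldl remove_iso_step ([], false)).1

-- ===== PORT B =====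
-- the while loop: count of leading characters in '1234567890'
def remove_iso_lead (l : List Char) : Nat :=
  match l with
  | [] => 0
  | c :: t => if remove_iso_isDig c then remove_iso_lead t + 1 else 0

def remove_iso_alt (atom : String) : String :=
  String.mk (atom.toList.drop (remove_iso_lead atom.toList))

-- ===== PRECONDITION & SPEC =====
def Spec_remove_iso (atom : String) (out : String) : Prop := out = remove_iso_alt atom
instance (atom : String) (out : String) : Decidable (Spec_remove_iso atom out) := by unfold Spec_remove_iso; infer_instance

-- ===== CLAIM (what is proved, stated in full; the proofs are below) =====
def Claim_equal_remove_iso : Prop := ∀ (atom : String), Dom_remove_iso atom → Spec_remove_iso atom (remove_iso atom)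

-- ===== LEMMAS AND PROOFS =====
theorem remove_iso_foldl_done (l acc : List Char) :
    l.foldl remove_iso_step (acc, true) = (acc ++ l, true) := by
  induction l generalizing acc with
  | nil => simp
  | cons c t ih => simp [remove_iso_step, ih]

theorem remove_iso_foldl_open (l acc : List Char) :
    (l.foldl remove_iso_step (acc, false)).1 = acc ++ l.drop (remove_iso_lead l) := by
  induction l generalizing acc with
  | nil => simp [remove_iso_lead]
  | cons c t ih =>
    by_cases h : remove_iso_isDig c
    · simp [remove_iso_step, remove_iso_lead, h, ih]
    · simp [remove_iso_step, remove_iso_lead, h, remove_iso_foldl_done]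

-- ===== VERDICT (by name: the statement is the Claim_ definition above) =====
theorem remove_iso_spec : Claim_equal_remove_iso := by
  intro atom _
  unfold Spec_remove_iso remove_iso remove_iso_alt
  rw [remove_iso_foldl_open]
  simp
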